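-- pv_equiv track=rewrite | github.com/NNHHUU01/.linkstack | generate_linkstack.py | group_containers
-- ===== SOURCE A (Python) =====
-- def group_containers(containers):
--
--     grouped_containers = {}
--     for container in containers:
--         group = container.get("group", "Other")
--         if group not in grouped_containers:
--             grouped_containers[group] = []
--         grouped_containers[group].append(container)
--
--     grouped_containers = dict(sorted(grouped_containers.items(), key=lambda x: x[0]))
--     for group in grouped_containers:
--         grouped_containers[group].sort(key=lambda x: x["name"])
--
--     return grouped_containers
-- ===== SOURCE B (Python) =====
-- def group_containers(containers):
--     ordered = sorted(containers, key=lambda c: c["name"])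
--     ordered = sorted(ordered, key=lambda c: c.get("group", "Other"))
--     result = {}
--     for c in ordered:
--         result.setdefault(c.get("group", "Other"), []).append(c)
--     return result
-- ===== Notes on version B (the rewrite author's own statement) =====
-- stated objective: simpler
-- what changed: B replaces A's group-then-sort-dict-items-then-sort-each-bucket pipeline by one name-sort followed by one stable group-sort and a single setdefault grouping pass (no dict re-sorting, no per-group .sort).
import Mathlib
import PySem

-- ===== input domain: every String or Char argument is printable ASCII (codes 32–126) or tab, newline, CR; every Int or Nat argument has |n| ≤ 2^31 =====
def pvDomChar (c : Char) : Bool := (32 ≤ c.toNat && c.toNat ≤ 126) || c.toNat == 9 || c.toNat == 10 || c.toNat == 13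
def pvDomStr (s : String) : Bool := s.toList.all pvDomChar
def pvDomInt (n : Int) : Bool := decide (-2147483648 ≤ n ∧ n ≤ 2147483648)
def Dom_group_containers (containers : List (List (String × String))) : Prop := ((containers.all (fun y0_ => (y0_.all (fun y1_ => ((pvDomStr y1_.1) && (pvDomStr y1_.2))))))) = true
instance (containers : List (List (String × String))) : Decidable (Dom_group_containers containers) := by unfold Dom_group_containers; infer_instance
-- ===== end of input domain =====

-- B groups with a single name-sort + stable group-sort + one setdefault pass instead of A's
-- per-group sorts; equivalence of the RETURN value is proved (A mutates its local dict only).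

-- shared key helpers (container.get("group", "Other") and container["name"]):
def pvGroupKey (c : List (String × String)) : String := (PySem.Dict.mk c).getD "group" "Other"
-- c["name"]: raises KeyError when "name" is absent — Pre_ excludes that; getD "" is exact under Pre_
def pvNameKey (c : List (String × String)) : String := (PySem.Dict.mk c).getD "name" ""

-- ===== PORT A =====
def group_containers (containers : List (List (String × String))) : List (String × List (List (String × String))) :=
  let grouped := containers.foldl
    (fun d c =>
      let g := pvGroupKey c
      let d := if d.contains g then d else d.insert g ([] : List (List (String × String)))
      d.modify g [] (fun l => l ++ [c]))
    PySem.Dict.empty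
  let grouped2 := PySem.Dict.mk (PySem.List.sorted grouped.items (fun x => x.1) false)
  -- for group in grouped: grouped[group].sort(key=lambda x: x["name"])
  let grouped3 := grouped2.keys.foldl
    (fun d g => d.modify g [] (fun l => PySem.List.sorted l pvNameKey false)) grouped2
  grouped3.items

-- ===== PORT B =====
def group_containers_alt (containers : List (List (String × String))) : List (String × List (List (String × String))) :=
  let ordered1 := PySem.List.sorted containers pvNameKey false
  let ordered := PySem.List.sorted ordered1 pvGroupKey false
  let result := ordered.foldl
    (fun d c =>
      let g := pvGroupKey c
      (d.setdefault g []).modify g [] (fun l => l ++ [c]))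
    PySem.Dict.empty
  result.items

-- ===== PRECONDITION & SPEC =====
-- Pre_ excludes exactly the inputs where A raises KeyError: a container without a "name" key.
def Pre_group_containers (containers : List (List (String × String))) : Prop :=
  (containers.all (fun c => c.any (fun p => p.1 == "name"))) = true
instance (containers : List (List (String × String))) : Decidable (Pre_group_containers containers) := by unfold Pre_group_containers; infer_instance
def pvWitness_group_containers : (List (List (String × String))) :=
  [[("name","b"),("group","g")], [("name","a")]]

def Spec_group_containers (containers : List (List (String × String))) (out : List (String × List (List (String × String)))) : Prop := out = group_containers_alt containers
instance (containers : List (List (String × String))) (out : List (String × List (List (String × String)))) : Decidable (Spec_group_containers containers out) := by unfold Spec_group_containers; infer_instance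

-- ===== CLAIM (what is proved, stated in full; the proofs are below) =====
def Claim_equal_group_containers : Prop := ∀ (containers : List (List (String × String))), Dom_group_containers containers → Pre_group_containers containers → Spec_group_containers containers (group_containers containers)

-- ===== LEMMAS AND PROOFS =====

-- the canonical value both programs compute
def pvGroups (containers : List (List (String × String))) : List String :=
  PySem.List.sorted (PySem.Set.ofList (containers.map pvGroupKey)) (fun g => g) false
def pvCanon (containers : List (List (String × String))) : List (String × List (List (String × String))) :=
  (pvGroups containers).map (fun g =>
    (g, PySem.List.sorted (containers.filter (fun c => pvGroupKey c == g)) pvNameKey false))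

-- the grouping step both folds collapse to
def pvStep (d : PySem.Dict String (List (List (String × String)))) (c : List (String × String)) :
    PySem.Dict String (List (List (String × String))) :=
  d.modify (pvGroupKey c) [] (fun l => l ++ [c])
def pvSortName (l : List (List (String × String))) : List (List (String × String)) :=
  PySem.List.sorted l pvNameKey false

lemma getD_of_not_contains {ν : Type} (d : PySem.Dict String ν) (g : String) (dflt : ν)
    (h : d.contains g = false) : d.getD g dflt = dflt := by
  unfold PySem.Dict.getD
  rw [(PySem.Dict.get?_eq_none_iff_contains d g).mpr h]
  rfl

lemma modify_insert_nil (d : PySem.Dict String (List (List (String × String)))) (g : String)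
    (f : List (List (String × String)) → List (List (String × String)))
    (h : d.contains g = false) :
    (d.insert g []).modify g [] f = d.modify g [] f := by
  unfold PySem.Dict.modify
  rw [PySem.Dict.getD_insert_self, PySem.Dict.insert_insert_self,
    getD_of_not_contains d g [] h]

lemma stepA_collapse :
    (fun (d : PySem.Dict String (List (List (String × String)))) c =>
      (if d.contains (pvGroupKey c) then d else d.insert (pvGroupKey c) []).modify
        (pvGroupKey c) [] (fun l => l ++ [c])) = pvStep := by
  funext d c
  by_cases h : d.contains (pvGroupKey c)
  · simp [h, pvStep]
  · simp only [h, Bool.false_eq_true, if_false]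
    exact modify_insert_nil d _ _ (by simp [h])

lemma stepB_collapse :
    (fun (d : PySem.Dict String (List (List (String × String)))) c =>
      ((d.setdefault (pvGroupKey c) []).modify (pvGroupKey c) [] (fun l => l ++ [c]))) = pvStep := by
  funext d c
  by_cases h : d.contains (pvGroupKey c)
  · simp [PySem.Dict.setdefault, h, pvStep]
  · have hins : d.setdefault (pvGroupKey c) [] = d.insert (pvGroupKey c) [] := by
      simp [PySem.Dict.setdefault, PySem.Dict.insert, h]
    rw [hins]
    exact modify_insert_nil d _ _ (by simp [h])

lemma getD_groupfold (xs : List (List (String × String)))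
    (d : PySem.Dict String (List (List (String × String)))) (g : String) :
    (xs.foldl pvStep d).getD g [] = d.getD g [] ++ xs.filter (fun c => pvGroupKey c == g) := by
  induction xs generalizing d with
  | nil => simp
  | cons c xs ih =>
    rw [List.foldl_cons, ih]
    show (d.modify (pvGroupKey c) [] (fun l => l ++ [c])).getD g [] ++ _ = _
    rw [PySem.Dict.getD_modify]
    by_cases h : pvGroupKey c = g
    · simp [h, List.append_assoc]
    · have h' : ¬ g = pvGroupKey c := fun hh => h hh.symm
      simp [h, h']

lemma keys_groupfold (xs : List (List (String × String))) :
    (xs.foldl pvStep PySem.Dict.empty).keys = PySem.Set.ofList (xs.map pvGroupKey) := by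
  have h := PySem.Dict.keys_foldl_modify_key xs pvGroupKey
    ([] : List (List (String × String))) (fun _ c => fun l => l ++ [c]) PySem.Dict.empty
  have h2 : (xs.foldl pvStep PySem.Dict.empty).keys
      = PySem.Set.update (PySem.Dict.empty :
          PySem.Dict String (List (List (String × String)))).keys (xs.map pvGroupKey) := h
  rw [h2]
  rw [PySem.Set.ofList_eq_foldl]
  rfl

lemma nodup_keys_groupfold (xs : List (List (String × String))) :
    (xs.foldl pvStep PySem.Dict.empty).keys.Nodup := by
  exact PySem.Dict.nodup_keys_foldl_modify_key xs pvGroupKey []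
    (fun _ c => fun l => l ++ [c]) PySem.Dict.empty List.nodup_nil

lemma items_groupfold (xs : List (List (String × String))) :
    (xs.foldl pvStep PySem.Dict.empty).items
      = (PySem.Set.ofList (xs.map pvGroupKey)).map
          (fun g => (g, xs.filter (fun c => pvGroupKey c == g))) := by
  rw [PySem.Dict.items_eq_map_keys _ (nodup_keys_groupfold xs) [], keys_groupfold]
  apply List.map_congr_left
  intro g _
  rw [getD_groupfold]
  rfl

-- ordered dedup is a sublist of its input
lemma ofList_sublist (L : List String) : (PySem.Set.ofList L).Sublist L := by
  induction L using List.reverseRecOn with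
  | nil => simp [PySem.Set.ofList_eq_foldl]
  | append_singleton L x ih =>
    rw [PySem.Set.ofList_eq_foldl, List.foldl_append, ← PySem.Set.ofList_eq_foldl]
    show (PySem.Set.add (PySem.Set.ofList L) x).Sublist (L ++ [x])
    unfold PySem.Set.add
    by_cases h : PySem.Set.contains (PySem.Set.ofList L) x
    · simp only [h, if_true]
      exact ih.trans (List.sublist_append_left L [x])
    · simp only [h, Bool.false_eq_true, if_false]
      exact ih.append (List.Sublist.refl [x])

-- a stable single-key sort commutes with filtering
lemma insertBy_cons_of_forall {α : Type} (bef : α → α → Bool) (x : α) (l : List α)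
    (h : ∀ z ∈ l, bef x z = true) : PySem.List.insertBy bef x l = x :: l := by
  cases l with
  | nil => rfl
  | cons z zs => simp [PySem.List.insertBy, h z (List.mem_cons_self)]

lemma filter_insertBy {α κ : Type} [LinearOrder κ] (key : α → κ) (q : α → Bool) (x : α)
    (ys : List α) (hys : ys.Pairwise (fun a b => key a ≤ key b)) :
    (PySem.List.insertBy (fun a b => decide (key a < key b)) x ys).filter q
      = if q x then PySem.List.insertBy (fun a b => decide (key a < key b)) x (ys.filter q)
        else ys.filter q := by
  induction ys with
  | nil =>
    cases hq : q x <;> simp [PySem.List.insertBy, hq]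
  | cons y ys ih =>
    rcases List.pairwise_cons.mp hys with ⟨hy, hys'⟩
    by_cases hb : key x < key y
    · have h1 : PySem.List.insertBy (fun a b => decide (key a < key b)) x (y :: ys)
          = x :: y :: ys := by
        simp [PySem.List.insertBy, hb]
      have h2 : ∀ z ∈ List.filter q (y :: ys), (fun a b => decide (key a < key b)) x z = true := by
        intro z hz
        rcases List.mem_cons.mp (List.mem_of_mem_filter hz) with rfl | hz'
        · simp [hb]
        · simp [lt_of_lt_of_le hb (hy z hz')]
      rw [h1, List.filter_cons]
      cases hq : q x
      · simp
      · rw [insertBy_cons_of_forall (fun a b => decide (key a < key b)) x (List.filter q (y :: ys)) h2]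
    · have h1 : PySem.List.insertBy (fun a b => decide (key a < key b)) x (y :: ys)
          = y :: PySem.List.insertBy (fun a b => decide (key a < key b)) x ys := by
        simp [PySem.List.insertBy, hb]
      have h2 : PySem.List.insertBy (fun a b => decide (key a < key b)) x (y :: List.filter q ys)
          = y :: PySem.List.insertBy (fun a b => decide (key a < key b)) x (List.filter q ys) := by
        simp [PySem.List.insertBy, hb]
      rw [h1, List.filter_cons, List.filter_cons, ih hys']
      cases hqy : q y <;> cases hq : q x <;> simp [h2]

lemma filter_sorted {α κ : Type} [LinearOrder κ] (xs : List α) (key : α → κ) (q : α → Bool) :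
    (PySem.List.sorted xs key false).filter q = PySem.List.sorted (xs.filter q) key false := by
  induction xs using List.reverseRecOn with
  | nil => rfl
  | append_singleton xs x ih =>
    rw [PySem.List.sorted_eq_foldl_insertBy, List.foldl_append, List.foldl_cons, List.foldl_nil,
      ← PySem.List.sorted_eq_foldl_insertBy]
    rw [filter_insertBy key q x _ (PySem.List.sorted_pairwise xs key), ih]
    rw [List.filter_append]
    cases hq : q x
    · simp [hq]
    · have hfx : List.filter q [x] = [x] := by simp [hq]
      rw [hfx, PySem.List.sorted_eq_foldl_insertBy (xs.filter q ++ [x]), List.foldl_append,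
        List.foldl_cons, List.foldl_nil, ← PySem.List.sorted_eq_foldl_insertBy]
      simp

lemma sorted_pairs (K : List String) (hK : K.Nodup) (v : String → List (List (String × String))) :
    PySem.List.sorted (K.map (fun g => (g, v g))) (fun x => x.1) false
      = (PySem.List.sorted K (fun g => g) false).map (fun g => (g, v g)) := by
  apply PySem.List.sorted_eq_of_perm_of_pairwise_lt
  · exact (PySem.List.sorted_perm K (fun g => g) false).map _
  · have hp := PySem.List.sorted_pairwise K (fun g => g)
    have hnd : (PySem.List.sorted K (fun g => g) false).Nodup :=
      ((PySem.List.sorted_perm K (fun g => g) false).nodup_iff).mpr hK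
    rw [List.pairwise_map]
    exact (hp.and hnd).imp (fun h => lt_of_le_of_ne h.1 h.2)

lemma getD_mk_map (ks : List String) (w : String → List (List (String × String))) (g : String)
    (hg : g ∈ ks) (dflt : List (List (String × String))) :
    (PySem.Dict.mk (ks.map (fun k => (k, w k)))).getD g dflt = w g := by
  induction ks with
  | nil => cases hg
  | cons k ks ih =>
    unfold PySem.Dict.getD
    rw [List.map_cons, PySem.Dict.get?_mk_cons]
    by_cases h : k = g
    · subst h; simp
    · have hne : (k == g) = false := by simp [h]
      rw [hne]
      simp only [Bool.false_eq_true, if_false]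
      exact ih (by
        rcases List.mem_cons.mp hg with rfl | h2
        · exact absurd rfl h
        · exact h2)

lemma mk_map_modify (ks : List String) (w : String → List (List (String × String))) (g : String)
    (f : List (List (String × String)) → List (List (String × String))) (hg : g ∈ ks) :
    (PySem.Dict.mk (ks.map (fun k => (k, w k)))).modify g [] f
      = PySem.Dict.mk (ks.map (fun k => (k, if k = g then f (w g) else w k))) := by
  have hc : (PySem.Dict.mk (ks.map (fun k => (k, w k)))).contains g = true := by
    simp only [PySem.Dict.contains, List.any_map]
    rw [List.any_eq_true]
    exact ⟨g, hg, by simp⟩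
  unfold PySem.Dict.modify PySem.Dict.insert
  rw [getD_mk_map ks w g hg, hc]
  simp only [if_true]
  congr 1
  rw [List.map_map]
  apply List.map_congr_left
  intro k _
  by_cases h : k = g
  · subst h; simp
  · simp [h]

lemma foldmod (f : List (List (String × String)) → List (List (String × String)))
    (gs : List String) :
    ∀ (ks : List String) (w : String → List (List (String × String))), gs.Nodup →
    (∀ g ∈ gs, g ∈ ks) →
    (gs.foldl (fun d g => d.modify g [] f)
        (PySem.Dict.mk (ks.map (fun k => (k, w k))))).items
      = ks.map (fun k => (k, if k ∈ gs then f (w k) else w k)) := by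
  induction gs with
  | nil => intro ks w _ _; simp
  | cons g gs ih =>
    intro ks w hnd hsub
    rcases List.nodup_cons.mp hnd with ⟨hgn, hnd'⟩
    rw [List.foldl_cons, mk_map_modify ks w g f (hsub g List.mem_cons_self)]
    rw [ih ks _ hnd' (fun g' h' => hsub g' (List.mem_cons_of_mem g h'))]
    apply List.map_congr_left
    intro k _
    by_cases h : k = g
    · subst h; simp [hgn]
    · simp [h, List.mem_cons]

lemma nodup_pvGroups (containers : List (List (String × String))) :
    (pvGroups containers).Nodup :=
  ((PySem.List.sorted_perm _ _ false).nodup_iff).mpr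
    (PySem.Set.nodup_ofList (containers.map pvGroupKey))

lemma filter_ordered (containers : List (List (String × String))) (g : String) :
    (PySem.List.sorted (PySem.List.sorted containers pvNameKey false) pvGroupKey false).filter
        (fun c => pvGroupKey c == g)
      = PySem.List.sorted (containers.filter (fun c => pvGroupKey c == g)) pvNameKey false := by
  rw [filter_sorted, filter_sorted]
  apply PySem.List.sorted_eq_self_of_pairwise
  apply List.pairwise_of_forall_mem_list
  intro a ha b hb
  have ha2 : pvGroupKey a = g := by
    have h1 := (PySem.List.mem_sorted _ _ _ a).mp ha
    exact eq_of_beq (List.mem_filter.mp h1).2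
  have hb2 : pvGroupKey b = g := by
    have h1 := (PySem.List.mem_sorted _ _ _ b).mp hb
    exact eq_of_beq (List.mem_filter.mp h1).2
  rw [ha2, hb2]

lemma set_of_ordered (containers : List (List (String × String))) :
    pvGroups containers
      = PySem.Set.ofList
          ((PySem.List.sorted (PySem.List.sorted containers pvNameKey false) pvGroupKey
            false).map pvGroupKey) := by
  unfold pvGroups
  apply PySem.List.sorted_eq_of_perm_of_pairwise_lt
  · have hp : (PySem.List.sorted (PySem.List.sorted containers pvNameKey false) pvGroupKey
        false).Perm containers :=
      (PySem.List.sorted_perm _ _ false).trans (PySem.List.sorted_perm _ _ false)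
    apply (List.perm_ext_iff_of_nodup (PySem.Set.nodup_ofList _)
      (PySem.Set.nodup_ofList _)).mpr
    intro a
    rw [PySem.Set.mem_ofList, PySem.Set.mem_ofList]
    exact (hp.map pvGroupKey).mem_iff
  · have h1 : ((PySem.List.sorted (PySem.List.sorted containers pvNameKey false) pvGroupKey
        false).map pvGroupKey).Pairwise (· ≤ ·) :=
      List.pairwise_map.mpr (PySem.List.sorted_pairwise _ pvGroupKey)
    have h2 := h1.sublist (ofList_sublist _)
    exact (h2.and (PySem.Set.nodup_ofList _)).imp (fun h => lt_of_le_of_ne h.1 h.2)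

theorem A_eq_canon (containers : List (List (String × String))) :
    group_containers containers = pvCanon containers := by
  simp only [group_containers]
  rw [stepA_collapse, items_groupfold,
    sorted_pairs _ (PySem.Set.nodup_ofList (containers.map pvGroupKey))]
  have hG : PySem.List.sorted (PySem.Set.ofList (List.map pvGroupKey containers))
      (fun g => g) false = pvGroups containers := rfl
  rw [hG]
  have hkeys : (PySem.Dict.mk ((pvGroups containers).map
      (fun g => (g, containers.filter (fun c => pvGroupKey c == g))))).keys
      = pvGroups containers := by
    rw [PySem.Dict.keys_mk, List.map_map]
    exact List.map_id _
  rw [hkeys]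
  rw [foldmod (fun l => PySem.List.sorted l pvNameKey false) (pvGroups containers)
    (pvGroups containers) _ (nodup_pvGroups containers) (fun _ h => h)]
  apply List.map_congr_left
  intro g hg
  simp [hg]

theorem B_eq_canon (containers : List (List (String × String))) :
    group_containers_alt containers = pvCanon containers := by
  simp only [group_containers_alt]
  rw [stepB_collapse, items_groupfold, ← set_of_ordered]
  apply List.map_congr_left
  intro g hg
  rw [filter_ordered]

-- ===== VERDICT (by name: the statement is the Claim_ definition above) =====
theorem group_containers_spec : Claim_equal_group_containers := by
  intro containers _ _
  unfold Spec_group_containers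
  rw [A_eq_canon, B_eq_canon]
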